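-- pv_equiv track=rewrite | github.com/danielWatson3141/coderID | 2984486(small)/ilikecode/5766201229705216/0/extracted/binary.py | bestTree
-- ===== SOURCE A (Python) =====
-- def bestTree (num, paths):
--     best=0
--     besti = -2
--     for i in range(1,num+1):
--         m = measureTree(buildTree(num, i, paths, []))[0]
--         if m > best:
--             best=m
--             besti = i
--     return str(num-best)
--
-- def buildTree(num, root, paths, forbidden):
--     tree = {}
--     for path in paths:
--         if path[0]==root and path[1] not in forbidden:
--             tree[path[1]] = buildTree(num, path[1], paths, list(forbidden)+[root])
--         if path[1]==root and path[0] not in forbidden: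
--             tree[path[0]] = buildTree(num, path[0], paths, list(forbidden)+[root])
--     return tree
--
-- def measureTree(tree):
--     test=[]
--     count = 0
--     totalChildren=0
--     for key, value in tree.items():
--         m=measureTree(value)
--         test+=[m]
--         totalChildren+=m[0]+m[1]
--         count+=1
--
--     if count==0:
--         return (1,0)
--     if count==1:
--         (keeps, removals)=test[0]
--         return (1,totalChildren)
--     if count==2:
--         (keeps1, removals1)=test[0]
--         (keeps2, removals2)=test[1]
--         return (1+keeps1+keeps2, removals1+removals2)
--
--     best=0
--     secondBest=0
--
--     for testVal in test:
--         if testVal[0] > best: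
--             secondBest = best
--             best = testVal[0]
--         elif testVal[0] > secondBest:
--             secondBest = testVal[0]
--     return (best+secondBest+1, totalChildren-best-secondBest)
-- ===== SOURCE B (Python) =====
-- def bestTree(num, paths):
--     # Build the adjacency lists once (distinct neighbours, first-occurrence order),
--     # then measure each rooted tree by a direct DFS over the adjacency structure
--     # instead of rebuilding a nested-dict tree by rescanning all paths at every node.
--     adj = {}
--
--     def add(a, b):
--         lst = adj.setdefault(a, [])
--         if b not in lst:
--             lst.append(b)
--
--     for a, b in paths:
--         add(a, b)
--         add(b, a)
--
--     def measure(v, anc):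
--         kids = [measure(u, anc | {v}) for u in adj.get(v, ()) if u not in anc]
--         if not kids:
--             return (1, 0)
--         total = sum(k + r for k, r in kids)
--         if len(kids) == 1:
--             return (1, total)
--         best = second = 0
--         for k, _ in kids:
--             if k > best:
--                 best, second = k, best
--             elif k > second:
--                 second = k
--         return (best + second + 1, total - best - second)
--
--     best = 0
--     for i in range(1, num + 1):
--         m = measure(i, frozenset())[0]
--         if m > best:
--             best = m
--     return str(num - best)
-- ===== Notes on version B (the rewrite author's own statement) =====
-- stated objective: alternative
-- what changed: B precomputes an adjacency dictionary once and measures each rooted tree with a direct DFS carrying an ancestor set, instead of A's per-root recursive construction of nested dict trees that rescans the whole path list at every tree node before measuring them.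
import Mathlib
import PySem

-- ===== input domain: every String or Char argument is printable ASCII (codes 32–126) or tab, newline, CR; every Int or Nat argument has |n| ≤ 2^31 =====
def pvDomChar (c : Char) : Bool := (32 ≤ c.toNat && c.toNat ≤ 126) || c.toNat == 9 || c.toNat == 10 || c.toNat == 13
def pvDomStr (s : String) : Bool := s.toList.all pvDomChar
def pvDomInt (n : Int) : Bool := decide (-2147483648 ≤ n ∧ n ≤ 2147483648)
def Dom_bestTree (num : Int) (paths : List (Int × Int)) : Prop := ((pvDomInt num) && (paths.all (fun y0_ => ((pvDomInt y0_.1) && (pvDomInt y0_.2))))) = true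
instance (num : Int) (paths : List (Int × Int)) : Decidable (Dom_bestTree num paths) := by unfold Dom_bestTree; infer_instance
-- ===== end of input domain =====

-- B replaces A's per-root rebuilding of nested dict trees (rescanning all paths at every
-- node) by one precomputed adjacency dictionary and a direct DFS measure per root.

-- ===== PORT A =====
-- Python's nested dict-of-dicts tree as a mutual inductive (assoc list in insertion order).
mutual
inductive PyTree : Type where
  | mk : PyTreeL → PyTree
  deriving DecidableEq, Repr
inductive PyTreeL : Type where
  | nil : PyTreeL
  | cons : Int → PyTree → PyTreeL → PyTreeL
  deriving DecidableEq, Repr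
end

-- dict assignment tree[k] = v : overwrite in place, new keys append (Python dict semantics)
def insT : PyTreeL → Int → PyTree → PyTreeL
  | .nil, k, v => .cons k v .nil
  | .cons a t r, k, v => if a = k then .cons a v r else .cons a t (insT r k v)

-- buildTree(num, root, paths, forbidden); the Nat argument is fuel, a totality guard only
-- (the recursion depth is bounded by twice the number of distinct endpoints).
def buildTreeA : Nat → Int → Int → List (Int × Int) → List Int → PyTree
  | 0, _, _, _, _ => .mk .nil
  | f+1, num, root, paths, forbidden => .mk <| paths.foldl (fun tree p =>
      let tree := if p.1 = root ∧ p.2 ∉ forbidden then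
          insT tree p.2 (buildTreeA f num p.2 paths (forbidden ++ [root])) else tree
      if p.2 = root ∧ p.1 ∉ forbidden then
          insT tree p.1 (buildTreeA f num p.1 paths (forbidden ++ [root])) else tree) .nil

-- measureTree(tree)
mutual
def measureA : PyTree → Int × Int
  | .mk l =>
    let test := measListA l
    let totalChildren := test.foldl (fun s m => s + m.1 + m.2) 0
    let count : Int := test.length
    if count = 0 then (1, 0)
    else if count = 1 then (1, totalChildren)
    else if count = 2 then
      let m1 := test.headD (0, 0)
      let m2 := (test.drop 1).headD (0, 0)
      (1 + m1.1 + m2.1, m1.2 + m2.2)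
    else
      let bs := test.foldl (fun (p : Int × Int) m =>
        if m.1 > p.1 then (m.1, p.1) else if m.1 > p.2 then (p.1, m.1) else p) (0, 0)
      (bs.1 + bs.2 + 1, totalChildren - bs.1 - bs.2)
def measListA : PyTreeL → List (Int × Int)
  | .nil => []
  | .cons _ t r => measureA t :: measListA r
end

def bestTree (num : Int) (paths : List (Int × Int)) : String :=
  let st := (PySem.List.pyRange 1 (num + 1) 1).foldl (fun (st : Int × Int) i =>
      let m := (measureA (buildTreeA (4 * paths.length + 4) num i paths [])).1
      if m > st.1 then (m, i) else st) (0, -2)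
  PySem.Int.toStr (num - st.1)

-- ===== PORT B =====
-- add(a, b): append b to adj[a] unless already present
def addNbr (d : PySem.Dict Int (List Int)) (a b : Int) : PySem.Dict Int (List Int) :=
  let lst := d.getD a []
  if b ∈ lst then d else d.insert a (lst ++ [b])

def adjB (paths : List (Int × Int)) : PySem.Dict Int (List Int) :=
  paths.foldl (fun d p => addNbr (addNbr d p.1 p.2) p.2 p.1) PySem.Dict.empty

-- measure(v, anc); the Nat argument is fuel, a totality guard only
def measB (adj : PySem.Dict Int (List Int)) : Nat → Int → PySem.Set Int → Int × Int
  | 0, _, _ => (1, 0)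
  | f+1, v, anc =>
    let kids := ((adj.getD v []).filter (fun u => !(PySem.Set.contains anc u))).map
        (fun u => measB adj f u (PySem.Set.add anc v))
    if kids.isEmpty then (1, 0)
    else
      let total := kids.foldl (fun s m => s + (m.1 + m.2)) 0
      if kids.length = 1 then (1, total)
      else
        let bs := kids.foldl (fun (p : Int × Int) m =>
          if m.1 > p.1 then (m.1, p.1) else if m.1 > p.2 then (p.1, m.1) else p) (0, 0)
        (bs.1 + bs.2 + 1, total - bs.1 - bs.2)

def bestTree_alt (num : Int) (paths : List (Int × Int)) : String :=
  let adj := adjB paths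
  let best := (PySem.List.pyRange 1 (num + 1) 1).foldl (fun best i =>
      let m := (measB adj (4 * paths.length + 4) i PySem.Set.empty).1
      if m > best then m else best) 0
  PySem.Int.toStr (num - best)

-- ===== PRECONDITION & SPEC =====
def Spec_bestTree (num : Int) (paths : List (Int × Int)) (out : String) : Prop := out = bestTree_alt num paths
instance (num : Int) (paths : List (Int × Int)) (out : String) : Decidable (Spec_bestTree num paths out) := by unfold Spec_bestTree; infer_instance

-- ===== CLAIM (what is proved, stated in full; the proofs are below) =====
def Claim_equal_bestTree : Prop := ∀ (num : Int) (paths : List (Int × Int)), Dom_bestTree num paths → Spec_bestTree num paths (bestTree num paths)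



-- ===== LEMMAS AND PROOFS =====

-- the neighbours of v contributed by each path, in A's encounter order
def nbrs (v : Int) (paths : List (Int × Int)) : List Int :=
  paths.flatMap (fun p => (if p.1 = v then [p.2] else []) ++ (if p.2 = v then [p.1] else []))

-- first-occurrence deduplication, in a recursion-friendly form
def pyDedup : List Int → List Int
  | [] => []
  | a :: r => a :: pyDedup (r.filter (fun x => x ≠ a))
termination_by l => l.length
decreasing_by
  refine Nat.lt_succ_of_le ?_
  rw [List.length_unattach]
  exact (List.length_filter_le _ _).trans (le_of_eq List.length_attach)

theorem pyDedup_nil : pyDedup [] = [] := by rw [pyDedup.eq_def]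

theorem pyDedup_cons (a : Int) (r : List Int) :
    pyDedup (a :: r) = a :: pyDedup (r.filter (fun x => x ≠ a)) := by rw [pyDedup.eq_def]

-- induction principle following pyDedup's recursion
theorem pyDedup_ind (P : List Int → Prop) (h0 : P [])
    (h1 : ∀ a r, P (r.filter (fun x => x ≠ a)) → P (a :: r)) : ∀ l, P l := by
  intro l
  generalize hn : l.length = n
  induction n using Nat.strong_induction_on generalizing l with
  | _ n ih =>
    match l, hn with
    | [], _ => exact h0
    | a :: r, hn =>
      refine h1 a r (ih (r.filter (fun x => x ≠ a)).length ?_ _ rfl)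
      have h2 := List.length_filter_le (fun x => decide (x ≠ a)) r
      have h3 : r.length + 1 = n := by simpa using hn
      omega

theorem mem_pyDedup (l : List Int) : ∀ x : Int, x ∈ pyDedup l ↔ x ∈ l := by
  induction l using pyDedup_ind with
  | h0 => intro x; rw [pyDedup_nil]
  | h1 a r ih =>
    intro x
    rw [pyDedup_cons]
    simp only [List.mem_cons, ih, List.mem_filter]
    by_cases hx : x = a <;> simp [hx]

theorem pyDedup_append_singleton (l : List Int) (x : Int) :
    pyDedup (l ++ [x]) = if x ∈ l then pyDedup l else pyDedup l ++ [x] := by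
  induction l using pyDedup_ind generalizing x with
  | h0 => simp [pyDedup_nil, pyDedup_cons]
  | h1 a r ih =>
    by_cases hx : x = a
    · subst hx
      rw [List.cons_append, pyDedup_cons, pyDedup_cons]
      simp [List.filter_append]
    · have hfa : (r ++ [x]).filter (fun y => y ≠ a) = r.filter (fun y => y ≠ a) ++ [x] := by
        simp [List.filter_append, hx]
      rw [List.cons_append, pyDedup_cons, hfa, ih, pyDedup_cons]
      simp only [List.mem_filter, List.mem_cons, decide_eq_true_eq]
      by_cases hr : x ∈ r <;> simp [hr, hx]

theorem filter_pyDedup (p : Int → Bool) (l : List Int) :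
    (pyDedup l).filter p = pyDedup (l.filter p) := by
  induction l using pyDedup_ind with
  | h0 => simp [pyDedup_nil]
  | h1 a r ih =>
    by_cases hp : p a
    · have h1 : (a :: r).filter p = a :: r.filter p := List.filter_cons_of_pos hp
      rw [pyDedup_cons, List.filter_cons_of_pos hp, h1, pyDedup_cons, ih, List.filter_comm]
    · have h1 : (a :: r).filter p = r.filter p := List.filter_cons_of_neg (by simpa using hp)
      have h2 : (r.filter p).filter (fun x => x ≠ a) = r.filter p := by
        apply List.filter_eq_self.2
        intro x hx
        have hxp : p x := List.of_mem_filter hx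
        simp only [ne_eq, decide_eq_true_eq]
        rintro rfl
        exact hp hxp
      rw [pyDedup_cons, List.filter_cons_of_neg (by simpa using hp), ih, List.filter_comm, h2, h1]

-- ---- the adjacency dict of B, characterised ----
theorem addNbr_getD (d : PySem.Dict Int (List Int)) (a b : Int) (g : Int → List Int)
    (h : ∀ v, d.getD v [] = pyDedup (g v)) (v : Int) :
    (addNbr d a b).getD v [] = pyDedup (g v ++ if a = v then [b] else []) := by
  unfold addNbr
  by_cases hb : b ∈ d.getD a []
  · rw [if_pos hb]
    by_cases hv : a = v
    · subst hv
      rw [if_pos rfl, h a, pyDedup_append_singleton,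
        if_pos ((mem_pyDedup (g a) b).1 (h a ▸ hb))]
    · rw [if_neg hv, List.append_nil, h v]
  · rw [if_neg hb]
    have hbg : b ∉ g a := fun hx => hb (by rw [h a]; exact (mem_pyDedup (g a) b).2 hx)
    rw [PySem.Dict.getD_insert]
    by_cases hv : v = a
    · subst hv
      rw [if_pos rfl, if_pos rfl, h v, pyDedup_append_singleton, if_neg hbg]
    · rw [if_neg hv, if_neg (fun h' : a = v => hv h'.symm), List.append_nil, h v]

theorem adj_fold (ps : List (Int × Int)) :
    ∀ (d : PySem.Dict Int (List Int)) (g : Int → List Int),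
    (∀ v, d.getD v [] = pyDedup (g v)) →
    ∀ v, (ps.foldl (fun d p => addNbr (addNbr d p.1 p.2) p.2 p.1) d).getD v [] =
      pyDedup (g v ++ nbrs v ps) := by
  induction ps with
  | nil => intro d g h v; simp [nbrs, h v]
  | cons p ps ih =>
    intro d g h v
    simp only [List.foldl_cons]
    have h1 := addNbr_getD d p.1 p.2 g h
    have h2 := addNbr_getD (addNbr d p.1 p.2) p.2 p.1
      (fun v => g v ++ if p.1 = v then [p.2] else []) h1
    have h3 : ∀ v, (addNbr (addNbr d p.1 p.2) p.2 p.1).getD v [] =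
        pyDedup (g v ++ ((if p.1 = v then [p.2] else []) ++ (if p.2 = v then [p.1] else []))) := by
      intro v; rw [h2 v, List.append_assoc]
    rw [ih _ _ h3 v]
    simp [nbrs, List.append_assoc]

theorem adjB_getD (paths : List (Int × Int)) (v : Int) :
    (adjB paths).getD v [] = pyDedup (nbrs v paths) := by
  have := adj_fold paths PySem.Dict.empty (fun _ => []) (fun v => by simp [pyDedup_nil]) v
  simpa [adjB] using this

-- ---- the nested tree built by A, characterised ----
def toL : List (Int × PyTree) → PyTreeL
  | [] => .nil
  | (k, v) :: r => .cons k v (toL r)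

theorem measListA_toL (l : List (Int × PyTree)) :
    measListA (toL l) = l.map (fun kv => measureA kv.2) := by
  induction l with
  | nil => simp [toL, measListA]
  | cons kv r ih => cases kv; simp [toL, measListA, ih]

def addIf (L : List Int) (x : Int) : List Int := if x ∈ L then L else L ++ [x]

def addAll (L : List Int) (xs : List Int) : List Int := xs.foldl addIf L

theorem insT_toL (val : Int → PyTree) (c : Int) (L : List Int) :
    insT (toL (L.map fun k => (k, val k))) c (val c) =
      toL ((addIf L c).map fun k => (k, val k)) := by
  induction L with
  | nil => simp [toL, insT, addIf]
  | cons a r ih =>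
    by_cases hc : a = c
    · subst hc
      simp [toL, insT, addIf]
    · have hstep : insT (toL ((a :: r).map fun k => (k, val k))) c (val c) =
          .cons a (val a) (insT (toL (r.map fun k => (k, val k))) c (val c)) := by
        simp [toL, insT, hc]
      rw [hstep, ih]
      simp only [addIf, List.mem_cons]
      have hca : ¬ c = a := fun h => hc h.symm
      by_cases hr : c ∈ r
      · simp [hr, hca, toL]
      · simp [hr, hca, toL]

theorem addAll_eq (xs : List Int) : ∀ L : List Int,
    addAll L xs = L ++ pyDedup (xs.filter (fun x => x ∉ L)) := by
  induction xs with
  | nil => intro L; simp [addAll, pyDedup_nil]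
  | cons x xs ih =>
    intro L
    have hstep : addAll L (x :: xs) = addAll (addIf L x) xs := rfl
    by_cases hx : x ∈ L
    · rw [hstep, show addIf L x = L from if_pos hx, ih L]
      congr 2
      simp [hx]
    · have hf : (x :: xs).filter (fun y => y ∉ L) = x :: xs.filter (fun y => y ∉ L) := by
        simp [hx]
      have hff : (xs.filter (fun y => y ∉ L)).filter (fun y => y ≠ x) =
          xs.filter (fun y => y ∉ L ++ [x]) := by
        rw [List.filter_filter]
        apply List.filter_congr
        intro y _
        by_cases hy1 : y = x <;> by_cases hy2 : y ∈ L <;> simp [hy1, hy2, hx]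
      rw [hstep, show addIf L x = L ++ [x] from if_neg hx, ih (L ++ [x]), hf, pyDedup_cons, hff]
      simp

theorem buildA_fold (f : Nat) (num root : Int) (paths : List (Int × Int)) (F : List Int)
    (ps : List (Int × Int)) : ∀ L : List Int,
    ps.foldl (fun tree p =>
      let tree := if p.1 = root ∧ p.2 ∉ F then
          insT tree p.2 (buildTreeA f num p.2 paths (F ++ [root])) else tree
      if p.2 = root ∧ p.1 ∉ F then
          insT tree p.1 (buildTreeA f num p.1 paths (F ++ [root])) else tree)
      (toL (L.map fun k => (k, buildTreeA f num k paths (F ++ [root])))) =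
    toL ((addAll L ((nbrs root ps).filter (fun x => x ∉ F))).map
      (fun k => (k, buildTreeA f num k paths (F ++ [root])))) := by
  induction ps with
  | nil => intro L; simp [nbrs, addAll]
  | cons p ps ih =>
    intro L
    have hsplit : ∀ L' : List Int, addAll L' ((nbrs root (p :: ps)).filter (fun x => x ∉ F)) =
        addAll (addAll L' (((if p.1 = root then [p.2] else []) ++
          (if p.2 = root then [p.1] else [])).filter (fun x => x ∉ F)))
          ((nbrs root ps).filter (fun x => x ∉ F)) := by
      intro L'
      have : (nbrs root (p :: ps)).filter (fun x => x ∉ F) =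
          ((if p.1 = root then [p.2] else []) ++
            (if p.2 = root then [p.1] else [])).filter (fun x => x ∉ F) ++
          (nbrs root ps).filter (fun x => x ∉ F) := by
        simp [nbrs, List.filter_append]
      rw [this]
      simp [addAll, List.foldl_append]
    simp only [List.foldl_cons]
    by_cases h1 : p.1 = root ∧ p.2 ∉ F <;> by_cases h2 : p.2 = root ∧ p.1 ∉ F
    · have hd : ((if p.1 = root then [p.2] else []) ++
          (if p.2 = root then [p.1] else [])).filter (fun x => x ∉ F) = [p.2, p.1] := by
        rw [if_pos h1.1, if_pos h2.1]
        simp [h1.2, h2.2]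
      rw [if_pos h1, if_pos h2, insT_toL, insT_toL, ih, hsplit L, hd]
      rfl
    · have hd : ((if p.1 = root then [p.2] else []) ++
          (if p.2 = root then [p.1] else [])).filter (fun x => x ∉ F) = [p.2] := by
        rw [if_pos h1.1]
        by_cases hp : p.2 = root
        · have hp1 : p.1 ∈ F := by by_contra hc; exact h2 ⟨hp, hc⟩
          rw [if_pos hp]
          simp [h1.2, hp1]
        · rw [if_neg hp]
          simp [h1.2]
      rw [if_pos h1, if_neg h2, insT_toL, ih, hsplit L, hd]
      rfl
    · have hd : ((if p.1 = root then [p.2] else []) ++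
          (if p.2 = root then [p.1] else [])).filter (fun x => x ∉ F) = [p.1] := by
        rw [if_pos h2.1]
        by_cases hp : p.1 = root
        · have hp2 : p.2 ∈ F := by by_contra hc; exact h1 ⟨hp, hc⟩
          rw [if_pos hp]
          simp [hp2, h2.2]
        · rw [if_neg hp]
          simp [h2.2]
      rw [if_neg h1, if_pos h2, insT_toL, ih, hsplit L, hd]
      rfl
    · have hd : ((if p.1 = root then [p.2] else []) ++
          (if p.2 = root then [p.1] else [])).filter (fun x => x ∉ F) = [] := by
        by_cases hp : p.1 = root <;> by_cases hq : p.2 = root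
        · have hpa : p.2 ∈ F := by by_contra hc; exact h1 ⟨hp, hc⟩
          have hpb : p.1 ∈ F := by by_contra hc; exact h2 ⟨hq, hc⟩
          rw [if_pos hp, if_pos hq]
          simp [hpa, hpb]
        · have hpa : p.2 ∈ F := by by_contra hc; exact h1 ⟨hp, hc⟩
          rw [if_pos hp, if_neg hq]
          simp [hpa]
        · have hpb : p.1 ∈ F := by by_contra hc; exact h2 ⟨hq, hc⟩
          rw [if_neg hp, if_pos hq]
          simp [hpb]
        · rw [if_neg hp, if_neg hq]
          rfl
      rw [if_neg h1, if_neg h2, ih, hsplit L, hd]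
      rfl

-- ---- the two branch bodies ----
def branchA (test : List (Int × Int)) : Int × Int :=
  let totalChildren := test.foldl (fun s m => s + m.1 + m.2) 0
  let count : Int := test.length
  if count = 0 then (1, 0)
  else if count = 1 then (1, totalChildren)
  else if count = 2 then
    let m1 := test.headD (0, 0)
    let m2 := (test.drop 1).headD (0, 0)
    (1 + m1.1 + m2.1, m1.2 + m2.2)
  else
    let bs := test.foldl (fun (p : Int × Int) m =>
      if m.1 > p.1 then (m.1, p.1) else if m.1 > p.2 then (p.1, m.1) else p) (0, 0)
    (bs.1 + bs.2 + 1, totalChildren - bs.1 - bs.2)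

def branchB (kids : List (Int × Int)) : Int × Int :=
  if kids.isEmpty then (1, 0)
  else
    let total := kids.foldl (fun s m => s + (m.1 + m.2)) 0
    if kids.length = 1 then (1, total)
    else
      let bs := kids.foldl (fun (p : Int × Int) m =>
        if m.1 > p.1 then (m.1, p.1) else if m.1 > p.2 then (p.1, m.1) else p) (0, 0)
      (bs.1 + bs.2 + 1, total - bs.1 - bs.2)

theorem measureA_mk (l : PyTreeL) : measureA (.mk l) = branchA (measListA l) := by
  rw [measureA, branchA]

theorem measB_succ (adj : PySem.Dict Int (List Int)) (f : Nat) (v : Int) (anc : PySem.Set Int) :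
    measB adj (f + 1) v anc = branchB (((adj.getD v []).filter
      (fun u => !(PySem.Set.contains anc u))).map (fun u => measB adj f u (PySem.Set.add anc v))) := by
  rw [measB, branchB]

theorem foldl_total (ms : List (Int × Int)) : ∀ s : Int,
    ms.foldl (fun s m => s + m.1 + m.2) s = ms.foldl (fun s m => s + (m.1 + m.2)) s := by
  induction ms with
  | nil => intro s; rfl
  | cons m ms ih => intro s; simp only [List.foldl_cons, add_assoc]

theorem bs_inv (ms : List (Int × Int)) : ∀ p : Int × Int, 0 ≤ p.2 → p.2 ≤ p.1 →
    0 ≤ (ms.foldl (fun (p : Int × Int) m =>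
      if m.1 > p.1 then (m.1, p.1) else if m.1 > p.2 then (p.1, m.1) else p) p).2 ∧
    (ms.foldl (fun (p : Int × Int) m =>
      if m.1 > p.1 then (m.1, p.1) else if m.1 > p.2 then (p.1, m.1) else p) p).2 ≤
    (ms.foldl (fun (p : Int × Int) m =>
      if m.1 > p.1 then (m.1, p.1) else if m.1 > p.2 then (p.1, m.1) else p) p).1 := by
  induction ms with
  | nil => intro p h1 h2; exact ⟨h1, h2⟩
  | cons m ms ih =>
    intro p h1 h2
    simp only [List.foldl_cons]
    by_cases hb : m.1 > p.1
    · rw [if_pos hb]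
      exact ih (m.1, p.1) (le_trans h1 h2) (le_of_lt hb)
    · rw [if_neg hb]
      by_cases hs : m.1 > p.2
      · rw [if_pos hs]
        exact ih (p.1, m.1) (le_trans h1 (le_of_lt hs)) (not_lt.1 hb)
      · rw [if_neg hs]
        exact ih p h1 h2

theorem measB_fst_pos (adj : PySem.Dict Int (List Int)) (f : Nat) :
    ∀ (v : Int) (anc : PySem.Set Int), 1 ≤ (measB adj f v anc).1 := by
  induction f with
  | zero => intro v anc; rw [measB]
  | succ f ih =>
    intro v anc
    rw [measB_succ]
    set kids := ((adj.getD v []).filter (fun u => !(PySem.Set.contains anc u))).map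
      (fun u => measB adj f u (PySem.Set.add anc v)) with hk
    unfold branchB
    by_cases h0 : kids.isEmpty
    · simp [h0]
    · simp only [h0, if_false, Bool.false_eq_true]
      by_cases h1 : kids.length = 1
      · simp [h1]
      · simp only [h1, if_false]
        have := bs_inv kids (0, 0) le_rfl le_rfl
        omega

theorem branch_eq (ms : List (Int × Int)) (h : ∀ m ∈ ms, 1 ≤ m.1) :
    branchA ms = branchB ms := by
  match ms with
  | [] => rfl
  | [m] => simp [branchA, branchB]
  | [m1, m2] =>
    have hm1 : 1 ≤ m1.1 := h m1 (by simp)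
    have hm2 : 1 ≤ m2.1 := h m2 (by simp)
    simp only [branchA, branchB, List.length_cons, List.length_nil, List.isEmpty_cons,
      List.foldl_cons, List.foldl_nil]
    norm_num
    rw [if_pos (by omega : m1.1 > (0 : Int))]
    by_cases hgt : m2.1 > m1.1
    · rw [if_pos hgt]
      constructor <;> omega
    · rw [if_neg hgt, if_pos (by omega : m2.1 > (0 : Int))]
      constructor <;> omega
  | m1 :: m2 :: m3 :: rest =>
    simp only [branchA, branchB, List.length_cons, List.isEmpty_cons]
    have hc0 : ((rest.length + 1 + 1 + 1 : Nat) : Int) ≠ 0 := by omega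
    have hc1 : ((rest.length + 1 + 1 + 1 : Nat) : Int) ≠ 1 := by omega
    have hc2 : ((rest.length + 1 + 1 + 1 : Nat) : Int) ≠ 2 := by omega
    have hc3 : (rest.length + 1 + 1 + 1 : Nat) ≠ 1 := by omega
    rw [if_neg hc0, if_neg hc1, if_neg hc2, if_neg (by simp), if_neg hc3, foldl_total]

-- ---- main equivalence of the recursive measures ----
theorem meas_eq (num : Int) (paths : List (Int × Int)) (f : Nat) :
    ∀ (root : Int) (F : List Int) (anc : PySem.Set Int), (∀ x : Int, x ∈ anc ↔ x ∈ F) →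
    measureA (buildTreeA f num root paths F) = measB (adjB paths) f root anc := by
  induction f with
  | zero =>
    intro root F anc h
    rw [buildTreeA, measB, measureA_mk]
    rfl
  | succ f ih =>
    intro root F anc h
    rw [measB_succ]
    have hb := buildA_fold f num root paths F paths []
    simp only [List.map_nil] at hb
    have hbuild : buildTreeA (f + 1) num root paths F =
        PyTree.mk (toL ((addAll [] ((nbrs root paths).filter (fun x => x ∉ F))).map
          (fun k => (k, buildTreeA f num k paths (F ++ [root]))))) := congrArg PyTree.mk hb
    have haddAll : addAll [] ((nbrs root paths).filter (fun x => x ∉ F)) =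
        pyDedup ((nbrs root paths).filter (fun x => x ∉ F)) := by
      rw [addAll_eq]
      simp
    rw [hbuild, haddAll, measureA_mk, measListA_toL]
    have hfilter : ((adjB paths).getD root []).filter (fun u => !(PySem.Set.contains anc u)) =
        pyDedup ((nbrs root paths).filter (fun x => x ∉ F)) := by
      rw [adjB_getD, filter_pyDedup]
      congr 1
      apply List.filter_congr
      intro u _
      have := h u
      by_cases hu : u ∈ F
      · simp [hu, this.2 hu]
      · have : u ∉ anc := fun hc => hu (this.1 hc)
        simp only [PySem.Set.contains_eq_listContains]
        simp [hu, this]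
    have hmem : ∀ x : Int, x ∈ PySem.Set.add anc root ↔ x ∈ F ++ [root] := by
      intro x
      rw [PySem.Set.mem_add]
      simp [h x]
    have hmap : (pyDedup ((nbrs root paths).filter (fun x => x ∉ F))).map
          ((fun (kv : Int × PyTree) => measureA kv.2) ∘
            (fun k => (k, buildTreeA f num k paths (F ++ [root])))) =
        (pyDedup ((nbrs root paths).filter (fun x => x ∉ F))).map
          (fun u => measB (adjB paths) f u (PySem.Set.add anc root)) := by
      apply List.map_congr_left
      intro c _
      simp only [Function.comp]
      exact ih c (F ++ [root]) (PySem.Set.add anc root) hmem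
    rw [hfilter, List.map_map, hmap]
    apply branch_eq
    intro m hm
    obtain ⟨u, -, rfl⟩ := List.mem_map.1 hm
    exact measB_fst_pos _ _ _ _

theorem fold_fst (fA fB : Int → Int) (hf : ∀ i, fA i = fB i) (l : List Int) :
    ∀ st : Int × Int,
    (l.foldl (fun (st : Int × Int) i => if fA i > st.1 then (fA i, i) else st) st).1 =
    l.foldl (fun b i => if fB i > b then fB i else b) st.1 := by
  induction l with
  | nil => intro st; rfl
  | cons i l ih =>
    intro st
    simp only [List.foldl_cons, hf i]
    by_cases hm : fB i > st.1
    · rw [if_pos hm, if_pos hm]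
      exact ih (fB i, i)
    · rw [if_neg hm, if_neg hm]
      exact ih st

-- ===== VERDICT (by name: the statement is the Claim_ definition above) =====
theorem bestTree_spec : Claim_equal_bestTree := by
  intro num paths _
  exact congrArg (fun t => PySem.Int.toStr (num - t)) (fold_fst
    (fun i => (measureA (buildTreeA (4 * paths.length + 4) num i paths [])).1)
    (fun i => (measB (adjB paths) (4 * paths.length + 4) i PySem.Set.empty).1)
    (fun i => congrArg Prod.fst
      (meas_eq num paths (4 * paths.length + 4) i [] PySem.Set.empty (fun _ => Iff.rfl)))
    (PySem.List.pyRange 1 (num + 1) 1) (0, -2))
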